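-- pv_equiv track=rewrite | github.com/nalankrishnav/Daily_Programming_Challenge_2024 | Day_6_of_30.py | sum_of_subarray
-- ===== SOURCE A (Python) =====
-- from collections import defaultdict
--
-- def sum_of_subarray(arr):
--     sum = 0
--     dic = defaultdict(list)
--     result = []
--
--     dic[0].append(-1)
--
--     for i in range(len(arr)):
--         sum += arr[i]
--
--         if sum in dic:
--             for start in dic[sum]:
--                 result.append((start + 1, i))
--
--         dic[sum].append(i)
--
--     return result
-- ===== SOURCE B (Python) =====
-- def sum_of_subarray(arr):
--     pre = [0]
--     for x in arr:
--         pre.append(pre[-1] + x)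
--     result = []
--     for i in range(len(arr)):
--         for s in range(i + 1):
--             if pre[s] == pre[i + 1]:
--                 result.append((s, i))
--     return result
-- ===== Notes on version B (the rewrite author's own statement) =====
-- stated objective: simpler
-- what changed: Replaces the defaultdict of previously seen prefix-sum indices with a plain prefix-sum array scanned by a nested start/end double loop, eliminating the hash map and the -1 sentinel.
import Mathlib
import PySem

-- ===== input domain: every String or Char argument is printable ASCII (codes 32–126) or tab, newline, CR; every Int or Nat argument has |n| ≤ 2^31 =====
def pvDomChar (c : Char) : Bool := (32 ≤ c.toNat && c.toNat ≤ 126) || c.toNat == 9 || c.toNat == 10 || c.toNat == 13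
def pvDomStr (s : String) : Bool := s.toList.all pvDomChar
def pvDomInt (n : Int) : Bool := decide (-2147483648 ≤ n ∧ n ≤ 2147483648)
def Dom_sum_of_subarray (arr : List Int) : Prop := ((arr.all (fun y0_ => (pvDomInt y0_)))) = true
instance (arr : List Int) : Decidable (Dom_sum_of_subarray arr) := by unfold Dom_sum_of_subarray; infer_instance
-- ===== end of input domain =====

-- B replaces A's defaultdict of previously-seen prefix-sum indices by a plain prefix-sum
-- array scanned with a nested start/end double loop (objective: simpler; not faster).

-- ===== PORT A =====
-- one iteration of A's 'for i in range(len(arr))' loop; state = (sum, dic, result)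
def pvAStep (arr : List Int) (st : Int × PySem.Dict Int (List Int) × List (Int × Int))
    (i : Int) : Int × PySem.Dict Int (List Int) × List (Int × Int) :=
  let sum := st.1 + PySem.List.pyGetD arr i 0          -- arr[i]; i is always in range
  let dic := st.2.1
  let result :=
    if dic.contains sum then                            -- 'if sum in dic'
      (dic.getD sum []).foldl (fun r start => r ++ [(start + 1, i)]) st.2.2
    else st.2.2
  (sum, dic.insert sum (dic.getD sum [] ++ [i]), result)  -- dic[sum].append(i)

def sum_of_subarray (arr : List Int) : List (Int × Int) :=
  let dic : PySem.Dict Int (List Int) := PySem.Dict.empty.insert 0 [-1]  -- dic[0].append(-1)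
  let st := (PySem.List.pyRange 0 arr.length 1).foldl (pvAStep arr) (0, dic, [])
  st.2.2

-- ===== PORT B =====
-- pre = [0]; for x in arr: pre.append(pre[-1] + x)   (pre is never empty, so pre[-1] succeeds)
def pvBPre (arr : List Int) : List Int :=
  arr.foldl (fun pre x => pre ++ [PySem.List.pyGetD pre (-1) 0 + x]) [0]

-- inner 'for s in range(i + 1)' loop of B
def pvBInner (pre : List Int) (i : Int) (result : List (Int × Int)) : List (Int × Int) :=
  (PySem.List.pyRange 0 (i + 1) 1).foldl
    (fun r s => if PySem.List.pyGetD pre s 0 == PySem.List.pyGetD pre (i + 1) 0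
                then r ++ [(s, i)] else r) result

def sum_of_subarray_alt (arr : List Int) : List (Int × Int) :=
  let pre := pvBPre arr
  (PySem.List.pyRange 0 arr.length 1).foldl (fun result i => pvBInner pre i result) []

-- ===== PRECONDITION & SPEC =====
def Spec_sum_of_subarray (arr : List Int) (out : List (Int × Int)) : Prop := out = sum_of_subarray_alt arr
instance (arr : List Int) (out : List (Int × Int)) : Decidable (Spec_sum_of_subarray arr out) := by unfold Spec_sum_of_subarray; infer_instance

-- ===== CLAIM (what is proved, stated in full; the proofs are below) =====
def Claim_equal_sum_of_subarray : Prop := ∀ (arr : List Int), Dom_sum_of_subarray arr → Spec_sum_of_subarray arr (sum_of_subarray arr)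

-- ===== LEMMAS AND PROOFS =====

-- mathematical prefix sum: pfxI arr s = arr[0] + … + arr[s-1]
def pfxI (arr : List Int) (s : Int) : Int := (arr.take s.toNat).sum

theorem pvBPre_aux (xs : List Int) : ∀ (acc : List Int) (c : Int), acc.getLast? = some c →
    xs.foldl (fun pre x => pre ++ [PySem.List.pyGetD pre (-1) 0 + x]) acc
      = acc ++ (List.range xs.length).map (fun t => c + (xs.take (t + 1)).sum) := by
  induction xs with
  | nil => intro acc c _; simp
  | cons x xs ih =>
    intro acc c hc
    have hne : acc ≠ [] := by intro h; simp [h] at hc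
    have hlast : PySem.List.pyGetD acc (-1) 0 = c := by
      rw [PySem.List.pyGetD_neg_one acc 0 hne, List.getLast_eq_iff_getLast?_eq_some hne]
      exact hc
    simp only [List.foldl_cons, hlast]
    rw [ih (acc ++ [c + x]) (c + x) (by simp)]
    simp only [List.length_cons, List.range_succ_eq_map, List.map_cons, List.map_map,
      List.append_assoc, List.singleton_append]
    congr 2
    · simp
    · apply List.map_congr_left
      intro t _
      simp [List.take_succ_cons, Function.comp]
      ring

theorem pvBPre_eq (arr : List Int) :
    pvBPre arr = (List.range (arr.length + 1)).map (fun t => ((arr.take t).sum : Int)) := by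
  unfold pvBPre
  rw [pvBPre_aux arr [0] 0 (by simp)]
  rw [List.range_succ_eq_map]
  simp [List.map_map, Function.comp]

theorem pvBPre_get (arr : List Int) (s : Int) (h0 : 0 ≤ s) (hn : s ≤ (arr.length : Int)) :
    PySem.List.pyGetD (pvBPre arr) s 0 = pfxI arr s := by
  rw [pvBPre_eq]
  have hs : s = ((s.toNat : Nat) : Int) := by omega
  rw [hs, PySem.List.pyGetD_natCast]
  have hlt : s.toNat < arr.length + 1 := by omega
  rw [List.getD_eq_getElem _ _ (by simpa using hlt)]
  simp [pfxI, max_eq_left h0]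

theorem pfxI_succ (arr : List Int) (k : Nat) (hk : k < arr.length) :
    pfxI arr ((k : Int) + 1) = pfxI arr k + PySem.List.pyGetD arr (k : Int) 0 := by
  unfold pfxI
  rw [PySem.List.pyGetD_natCast, List.getD_eq_getElem _ _ (by simpa using hk)]
  have h1 : ((k : Int) + 1).toNat = k + 1 := by omega
  have h2 : ((k : Int)).toNat = k := by omega
  rw [h1, h2, List.sum_take_succ arr k hk]

-- the main loop invariant: after k iterations A's state is (pfxI k, dic, result) where
-- result equals B's accumulator after k outer iterations, and dic maps each prefix value v
-- to the starts s-1 for the s ≤ k whose prefix sum is v.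
theorem pvLoop (arr : List Int) (k : Nat) (hk : k ≤ arr.length) :
    ((PySem.List.pyRange 0 (k : Int) 1).foldl (pvAStep arr)
        (0, PySem.Dict.empty.insert 0 [-1], [])).1 = pfxI arr k
    ∧ ((PySem.List.pyRange 0 (k : Int) 1).foldl (pvAStep arr)
        (0, PySem.Dict.empty.insert 0 [-1], [])).2.2
      = (PySem.List.pyRange 0 (k : Int) 1).foldl (fun result i => pvBInner (pvBPre arr) i result) []
    ∧ ∀ v, ((PySem.List.pyRange 0 (k : Int) 1).foldl (pvAStep arr)
        (0, PySem.Dict.empty.insert 0 [-1], [])).2.1.getD v []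
      = ((PySem.List.pyRange 0 ((k : Int) + 1) 1).filter (fun s => pfxI arr s == v)).map
          (fun s => s - 1) := by
  induction k with
  | zero =>
    rw [PySem.List.pyRange_one_eq_nil (by norm_num)]
    refine ⟨by simp [pfxI], rfl, ?_⟩
    intro v
    show (PySem.Dict.empty.insert 0 [-1]).getD v [] = _
    rw [PySem.Dict.getD_insert]
    have h01 : PySem.List.pyRange 0 (((0 : Nat) : Int) + 1) 1 = [(0 : Int)] := by
      simp only [Nat.cast_zero]
      exact PySem.List.pyRange_one_singleton 0
    rw [h01]
    by_cases hv : v = 0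
    · simp [hv, pfxI]
    · simp [hv, pfxI, Ne.symm hv, PySem.Dict.getD_empty]
  | succ k ih =>
    have hk' : k ≤ arr.length := by omega
    have hklt : k < arr.length := by omega
    obtain ⟨hsum, hres, hdic⟩ := ih hk'
    have hcast : ((k + 1 : Nat) : Int) = (k : Int) + 1 := by push_cast; ring
    rw [hcast, PySem.List.pyRange_one_succ_right (by positivity), List.foldl_append,
      List.foldl_append]
    set st := (PySem.List.pyRange 0 (k : Int) 1).foldl (pvAStep arr)
        (0, PySem.Dict.empty.insert 0 [-1], []) with hst
    -- the current prefix value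
    have hsum' : st.1 + PySem.List.pyGetD arr (k : Int) 0 = pfxI arr ((k : Int) + 1) := by
      rw [hsum, pfxI_succ arr k hklt]
    -- the filter list for the new prefix value
    have hget := hdic (pfxI arr ((k : Int) + 1))
    -- result of A's step = R ++ filter.map (s, k)
    have hAres : (pvAStep arr st (k : Int)).2.2
        = st.2.2 ++ ((PySem.List.pyRange 0 ((k : Int) + 1) 1).filter
            (fun s => pfxI arr s == pfxI arr ((k : Int) + 1))).map (fun s => (s, (k : Int))) := by
      show (let sum := st.1 + PySem.List.pyGetD arr (k : Int) 0;
            let dic := st.2.1;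
            if dic.contains sum then
              (dic.getD sum []).foldl (fun r start => r ++ [(start + 1, (k : Int))]) st.2.2
            else st.2.2) = _
      simp only [hsum']
      by_cases hc : st.2.1.contains (pfxI arr ((k : Int) + 1))
      · rw [if_pos hc, PySem.List.foldl_append_singleton_eq_map, hget, List.map_map]
        congr 1
        apply List.map_congr_left; intro s _; simp [Function.comp]
      · rw [if_neg hc]
        have h0 : st.2.1.getD (pfxI arr ((k : Int) + 1)) [] = [] :=
          PySem.Dict.getD_of_not_contains _ _ (by simpa using hc)
        rw [h0] at hget
        have hfil : (PySem.List.pyRange 0 ((k : Int) + 1) 1).filter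
            (fun s => pfxI arr s == pfxI arr ((k : Int) + 1)) = [] :=
          List.map_eq_nil_iff.mp hget.symm
        rw [hfil]
        simp
    refine ⟨?_, ?_, ?_⟩
    · show (pvAStep arr st (k : Int)).1 = _
      have h : (pvAStep arr st (k : Int)).1 = st.1 + PySem.List.pyGetD arr (k : Int) 0 := rfl
      rw [h, hsum']
    · show (pvAStep arr st (k : Int)).2.2 = pvBInner (pvBPre arr) (k : Int) _
      rw [hAres, ← hres]
      unfold pvBInner
      rw [PySem.List.foldl_append_if]
      congr 1
      have hk1 : PySem.List.pyGetD (pvBPre arr) ((k : Int) + 1) 0 = pfxI arr ((k : Int) + 1) :=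
        pvBPre_get arr _ (by positivity) (by omega)
      congr 1
      apply List.filter_congr
      intro s hs
      rw [PySem.List.mem_pyRange_one] at hs
      rw [hk1, pvBPre_get arr s hs.1 (by omega)]
    · intro v
      show (pvAStep arr st (k : Int)).2.1.getD v [] = _
      have hdic' : (pvAStep arr st (k : Int)).2.1
          = st.2.1.insert (pfxI arr ((k : Int) + 1))
              (st.2.1.getD (pfxI arr ((k : Int) + 1)) [] ++ [(k : Int)]) := by
        show st.2.1.insert (st.1 + PySem.List.pyGetD arr (k : Int) 0) _ = _
        rw [hsum']
      rw [hdic', PySem.Dict.getD_insert]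
      have hsplit : PySem.List.pyRange 0 ((k : Int) + 1 + 1) 1
          = PySem.List.pyRange 0 ((k : Int) + 1) 1 ++ [(k : Int) + 1] :=
        PySem.List.pyRange_one_succ_right (by positivity)
      rw [hsplit, List.filter_append, List.map_append]
      by_cases hv : v = pfxI arr ((k : Int) + 1)
      · rw [if_pos hv, hv, hget]
        simp
      · rw [if_neg hv, hdic v]
        have hne : (pfxI arr ((k : Int) + 1) == v) = false := by
          simp only [beq_eq_false_iff_ne, ne_eq]
          exact fun h => hv h.symm
        simp [hne]

-- ===== VERDICT (by name: the statement is the Claim_ definition above) =====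
theorem sum_of_subarray_spec : Claim_equal_sum_of_subarray := by
  intro arr _
  show sum_of_subarray arr = sum_of_subarray_alt arr
  unfold sum_of_subarray sum_of_subarray_alt
  exact (pvLoop arr arr.length le_rfl).2.1
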